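-- pv_equiv track=rewrite | github.com/jiji-svg/coding_test | level0/day2/id_pw.py | solution
-- ===== SOURCE A (Python) =====
-- def solution(id_pw, db):
--     answer = ''
--     id1, pw1 = id_pw
--     flag = False
--     for informations in db:
--         id0, pw0 = informations
--
--         if id0 == id1:
--             if pw0 == pw1:
--                 answer = 'login'
--                 break
--             else:
--                 answer = 'wrong pw'
--                 flag = True
--         else:
--             if flag == False:
--                 answer = 'fail'
--
--     return answer
-- ===== SOURCE B (Python) =====
-- def solution(id_pw, db):
--     # Declarative: derive the answer from two membership queries over db,
--     # instead of a stateful scan with an answer accumulator and a flag.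
--     id1, pw1 = id_pw
--     if [id1, pw1] in db:
--         return 'login'
--     if not db:
--         return ''
--     return 'wrong pw' if id1 in [i for i, p in db] else 'fail'
-- ===== Notes on version B (the rewrite author's own statement) =====
-- stated objective: simpler
-- what changed: B replaces A's stateful scan (mutable answer accumulator plus flag-suppression logic) with a declarative formulation: a membership test 'id_pw in db' for login, then an any() query over first columns for 'wrong pw', falling back to 'fail'/'' on the shape of db.
import Mathlib
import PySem

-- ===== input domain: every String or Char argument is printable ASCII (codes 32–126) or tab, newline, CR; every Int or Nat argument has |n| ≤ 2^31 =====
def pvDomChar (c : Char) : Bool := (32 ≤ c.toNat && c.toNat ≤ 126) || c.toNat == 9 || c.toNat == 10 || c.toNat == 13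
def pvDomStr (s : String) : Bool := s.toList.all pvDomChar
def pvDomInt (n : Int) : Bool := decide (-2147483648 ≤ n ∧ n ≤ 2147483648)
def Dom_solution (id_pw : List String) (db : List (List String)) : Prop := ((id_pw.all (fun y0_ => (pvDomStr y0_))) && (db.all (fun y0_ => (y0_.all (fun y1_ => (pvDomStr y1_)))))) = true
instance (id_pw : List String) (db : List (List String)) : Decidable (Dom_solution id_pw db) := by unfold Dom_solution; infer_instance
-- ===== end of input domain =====

-- B derives the answer declaratively from two membership queries ('id_pw in db', 'any id match')
-- instead of A's stateful scan with an answer accumulator and a flag; same O(n) cost, simpler.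


-- ===== PORT A =====
-- A's loop with its mutable 'answer' and 'flag'; the 'break' becomes stopping the
-- recursion with "login". A row that does not unpack into two items raises in Python;
-- such inputs are outside Pre_solution and the port returns "" there.
def solutionGoA (id1 pw1 answer : String) (flag : Bool) : List (List String) → String
  | [] => answer
  | row :: rest =>
    match row with
    | [id0, pw0] =>
      if id0 = id1 then
        if pw0 = pw1 then "login"
        else solutionGoA id1 pw1 "wrong pw" true rest
      else
        if flag = false then solutionGoA id1 pw1 "fail" flag rest
        else solutionGoA id1 pw1 answer flag rest
    | _ => ""  -- Python: ValueError on unpacking (outside Pre_)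

def solution (id_pw : List String) (db : List (List String)) : String :=
  match id_pw with
  | [id1, pw1] => solutionGoA id1 pw1 "" false db
  | _ => ""  -- Python: ValueError on unpacking (outside Pre_)

-- ===== PORT B =====
-- B's two membership queries. The comprehension [i for i, p in db] unpacks every row;
-- a row of length ≠ 2 raises ValueError in Python, which is unreachable inside Pre_ in
-- that branch (no full match ⇒ every row has length 2), so the "" default is never used.
def solution_alt (id_pw : List String) (db : List (List String)) : String :=
  match id_pw with
  | [id1, pw1] =>
    if [id1, pw1] ∈ db then "login"
    else if db = [] then ""
    else if id1 ∈ db.map (fun row => match row with | [i, _] => i | _ => "") then "wrong pw"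
    else "fail"
  | _ => ""  -- Python: ValueError on unpacking (outside Pre_)

-- ===== PRECONDITION & SPEC =====
-- Pre_ excludes exactly the inputs on which Python A raises ValueError: an id_pw that
-- is not a 2-list, or a db row of length ≠ 2 occurring before the first full match
-- (rows after the 'break' are never unpacked).
def Pre_solution (id_pw : List String) (db : List (List String)) : Prop :=
  id_pw.length = 2 ∧ ∀ r ∈ db.takeWhile (fun r => r ≠ id_pw), r.length = 2
instance (id_pw : List String) (db : List (List String)) : Decidable (Pre_solution id_pw db) := by unfold Pre_solution; infer_instance
def pvWitness_solution : List String × List (List String) := (["a", "b"], [["c", "d"], ["a", "b"]])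

def Spec_solution (id_pw : List String) (db : List (List String)) (out : String) : Prop := out = solution_alt id_pw db
instance (id_pw : List String) (db : List (List String)) (out : String) : Decidable (Spec_solution id_pw db out) := by unfold Spec_solution; infer_instance

-- ===== CLAIM (what is proved, stated in full; the proofs are below) =====
def Claim_equal_solution : Prop := ∀ (id_pw : List String) (db : List (List String)), Dom_solution id_pw db → Pre_solution id_pw db → Spec_solution id_pw db (solution id_pw db)

-- ===== LEMMAS AND PROOFS =====

-- characterisation of A's loop by B's two queries (membership of the full row, and
-- existence of an id match), under the well-formedness of rows before the first match
lemma solutionGoA_char (id1 pw1 : String) (db : List (List String)) :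
    ∀ (flag : Bool) (a0 : String),
    (∀ r ∈ db.takeWhile (fun r => r ≠ [id1, pw1]), r.length = 2) →
    solutionGoA id1 pw1 (if flag then "wrong pw" else a0) flag db =
      if [id1, pw1] ∈ db then "login"
      else if (flag || db.any (fun r => r.headD "" == id1)) then "wrong pw"
      else if db = [] then a0 else "fail" := by
  induction db with
  | nil => intro flag a0 _; cases flag <;> simp [solutionGoA]
  | cons row rest ih =>
    intro flag a0 hpre
    by_cases hm : row = [id1, pw1]
    · subst hm
      simp [solutionGoA]
    · have htw : (row :: rest).takeWhile (fun r => decide (r ≠ [id1, pw1])) =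
          row :: rest.takeWhile (fun r => decide (r ≠ [id1, pw1])) :=
        List.takeWhile_cons_of_pos (by simp [hm])
    
      have hlen : row.length = 2 := by
        apply hpre; rw [htw]; exact List.mem_cons_self
      have hrest : ∀ r ∈ rest.takeWhile (fun r => r ≠ [id1, pw1]), r.length = 2 := by
        intro r hr
        apply hpre; rw [htw]; exact List.mem_cons_of_mem _ hr
      match row, hlen with
      | [id0, pw0], _ =>
        by_cases hid : id0 = id1
        · by_cases hpw : pw0 = pw1
          · exact absurd (by rw [hid, hpw]) hm
          · have := ih true "" hrest
            simp only [solutionGoA, hid, hpw, if_true, if_false]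
            simp only [if_true] at this
            rw [this]
            have hm' : ([id1, pw1] : List String) ≠ [id0, pw0] := fun hh => hm hh.symm
            by_cases h : [id1, pw1] ∈ rest
            · simp [h]
            · have hne : ([id1, pw1] : List String) ≠ [id1, pw0] := by
                simp only [ne_eq, List.cons.injEq, true_and, and_true]
                exact fun hh => hpw hh.symm
              simp [h, hne]
        · have hhead : (([id0, pw0] : List String).headD "" == id1) = false := by
            simp [hid]
          simp only [solutionGoA, hid]
          cases flag
          · have := ih false "fail" hrest
            simp only [Bool.false_eq_true, if_false] at this ⊢
            rw [this]
            have hm' : ([id1, pw1] : List String) ≠ [id0, pw0] := fun hh => hm hh.symm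
            by_cases h : [id1, pw1] ∈ rest
            · simp [h, hm']
            · simp only [List.mem_cons, h, or_false, List.any_cons, hhead,
                Bool.false_or, if_neg hm']
              by_cases ha : rest.any (fun r => r.headD "" == id1) = true
              · simp
              · simp only [ha, if_false, Bool.false_eq_true]
                cases rest <;> simp
          · have := ih true a0 hrest
            simp only [if_true] at this ⊢
            simp only [if_neg (by decide : ¬ (true = false))]
            rw [this]
            have hm' : ([id1, pw1] : List String) ≠ [id0, pw0] := fun hh => hm hh.symm
            by_cases h : [id1, pw1] ∈ rest
            · simp [h]
            · simp [h, hm']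

-- takeWhile of a predicate that holds everywhere is the whole list
lemma takeWhile_all_eq {α : Type} (p : α → Bool) (l : List α) (h : ∀ x ∈ l, p x = true) :
    l.takeWhile p = l := by
  induction l with
  | nil => rfl
  | cons a l ih =>
    rw [List.takeWhile_cons, if_pos (h a List.mem_cons_self),
      ih (fun x hx => h x (List.mem_cons_of_mem _ hx))]

-- ===== VERDICT (by name: the statement is the Claim_ definition above) =====
theorem solution_spec : Claim_equal_solution := by
  intro id_pw db _ hpre
  unfold Spec_solution
  match id_pw with
  | [] => exact absurd hpre.1 (by simp)
  | [_] => exact absurd hpre.1 (by simp)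
  | _ :: _ :: _ :: _ => exact absurd hpre.1 (by simp)
  | [id1, pw1] =>
    have hkey := solutionGoA_char id1 pw1 db false "" hpre.2
    simp only [Bool.false_or, if_neg (by decide : ¬ (false = true))] at hkey
    rw [solution, hkey, solution_alt]
    by_cases hmem : [id1, pw1] ∈ db
    · simp [hmem]
    · by_cases hdb : db = []
      · subst hdb; simp
      · have hall : ∀ r ∈ db, r.length = 2 := by
          intro r hr
          apply hpre.2
          rw [takeWhile_all_eq]
          · exact hr
          · intro x hx
            simp only [decide_eq_true_eq, ne_eq]
            exact fun hc => hmem (hc ▸ hx)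
        have hmapeq : db.map (fun row => match row with | [i, _] => i | _ => "") =
            db.map (fun r => r.headD "") := by
          apply List.map_congr_left
          intro r hr
          match r, hall r hr with
          | [i, p], _ => rfl
        have hiff : id1 ∈ db.map (fun r => r.headD "") ↔
            db.any (fun r => r.headD "" == id1) = true := by
          rw [List.any_eq_true]
          simp only [List.mem_map, beq_iff_eq]
        simp only [if_neg hmem, if_neg hdb, hmapeq]
        by_cases ha : db.any (fun r => r.headD "" == id1) = true
        · rw [if_pos ha, if_pos (hiff.mpr ha)]
        · rw [if_neg ha, if_neg (fun hh => ha (hiff.mp hh))]
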